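-- pv_equiv track=rewrite | github.com/nir0s/jocker | jocker/jocker.py | _parse_dumb_push_output
-- ===== SOURCE A (Python) =====
-- def _parse_dumb_push_output(string):
--     """since the push process outputs a single unicode string consisting of
--     multiple JSON formatted "status" lines, we need to parse it so that it
--     can be read as multiple strings.
--
--     This will receive the string as an input, count curly braces and ignore
--     any newlines. When the curly braces stack is 0, it will append the
--     entire string it has read up until then to a list and so forth.
--
--     :param string: the string to parse
--     :rtype: list of JSON's
--     """
--     stack = 0
--     json_list = []
--     tmp_json = ''
--     for char in string:
--         if not char == '\r' and not char == '\n':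
--             tmp_json += char
--         if char == '{':
--             stack += 1
--         elif char == '}':
--             stack -= 1
--         if stack == 0:
--             if not len(tmp_json) == 0:
--                 json_list.append(tmp_json)
--             tmp_json = ''
--     return json_list
-- ===== SOURCE B (Python) =====
-- def _parse_dumb_push_output(string):
--     """Single pass tracking segment start index; each flushed segment is a
--     slice of the input with CR/LF filtered out, instead of per-char concat."""
--     result = []
--     depth = 0
--     start = 0
--     for i, ch in enumerate(string):
--         if ch == '{':
--             depth += 1
--         elif ch == '}':
--             depth -= 1
--         if depth == 0:
--             seg = ''.join(c for c in string[start:i + 1]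
--                           if c != '\r' and c != '\n')
--             if seg:
--                 result.append(seg)
--             start = i + 1
--     return result
-- ===== Notes on version B (the rewrite author's own statement) =====
-- stated objective: alternative
-- what changed: Replaces A's per-character accumulation into a growing tmp string by a single index-tracking pass that slices each balanced segment out of the input and strips CR/LF once per segment.
import Mathlib
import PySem

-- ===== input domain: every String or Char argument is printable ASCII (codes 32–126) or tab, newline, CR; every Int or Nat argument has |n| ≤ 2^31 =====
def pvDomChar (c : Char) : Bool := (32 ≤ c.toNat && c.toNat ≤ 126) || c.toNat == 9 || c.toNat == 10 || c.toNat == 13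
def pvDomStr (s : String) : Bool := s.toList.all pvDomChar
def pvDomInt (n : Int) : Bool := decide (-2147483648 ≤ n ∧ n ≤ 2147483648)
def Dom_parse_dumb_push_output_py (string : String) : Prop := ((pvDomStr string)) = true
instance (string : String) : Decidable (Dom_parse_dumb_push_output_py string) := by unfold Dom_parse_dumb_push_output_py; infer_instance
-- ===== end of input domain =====

-- B replaces A's per-character string accumulation by a single pass over indices
-- that slices each balanced segment out of the input and filters CR/LF once per
-- segment (objective: alternative decomposition; same observable return value).

-- ===== PORT A =====
-- per-character loop: accumulate tmp, count braces, flush when the stack is 0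
def pvAStep (s : Int × List (List Char) × List Char) (ch : Char) :
    Int × List (List Char) × List Char :=
  let tmp := if !(ch == '\r') && !(ch == '\n') then s.2.2 ++ [ch] else s.2.2
  let stack := if ch == '{' then s.1 + 1 else if ch == '}' then s.1 - 1 else s.1
  if stack == 0 then
    (stack, (if tmp.length != 0 then s.2.1 ++ [tmp] else s.2.1), ([] : List Char))
  else (stack, s.2.1, tmp)

def parse_dumb_push_output_py (string : String) : List String :=
  ((string.toList.foldl pvAStep (0, [], [])).2.1).map (fun cs => String.ofList cs)

-- ===== PORT B =====
def pvNotNl (c : Char) : Bool := !(c == '\r') && !(c == '\n')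

-- index loop: track depth and segment start; on depth 0 emit the CR/LF-filtered slice
def pvBStep (cs : List Char) (s : Int × Int × List (List Char)) (p : Int × Char) :
    Int × Int × List (List Char) :=
  let depth := if p.2 == '{' then s.1 + 1 else if p.2 == '}' then s.1 - 1 else s.1
  if depth == 0 then
    let seg := (PySem.List.slice cs (some s.2.1) (some (p.1 + 1))).filter pvNotNl
    (depth, p.1 + 1, if seg.length != 0 then s.2.2 ++ [seg] else s.2.2)
  else (depth, s.2.1, s.2.2)

def parse_dumb_push_output_py_alt (string : String) : List String :=
  (((PySem.List.enumerate string.toList).foldl (pvBStep string.toList)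
      (0, 0, [])).2.2).map (fun l => String.ofList l)

-- ===== PRECONDITION & SPEC =====
def Spec_parse_dumb_push_output_py (string : String) (out : List String) : Prop := out = parse_dumb_push_output_py_alt string
instance (string : String) (out : List String) : Decidable (Spec_parse_dumb_push_output_py string out) := by unfold Spec_parse_dumb_push_output_py; infer_instance

-- ===== CLAIM (what is proved, stated in full; the proofs are below) =====
def Claim_equal_parse_dumb_push_output_py : Prop := ∀ (string : String), Dom_parse_dumb_push_output_py string → Spec_parse_dumb_push_output_py string (parse_dumb_push_output_py string)

-- ===== LEMMAS AND PROOFS =====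

-- extending the current slice by the character at position k
lemma pv_take_succ_of_drop {cs rest : List Char} {ch : Char} {start k : Nat}
    (hsk : start ≤ k) (hd : cs.drop k = ch :: rest) :
    (cs.drop start).take (k + 1 - start) = (cs.drop start).take (k - start) ++ [ch] := by
  have h1 : (cs.drop start).drop (k - start) = ch :: rest := by
    rw [List.drop_drop, Nat.add_sub_cancel' hsk]; exact hd
  have h2 : (cs.drop start)[k - start]? = some ch := by
    rw [← List.head?_drop, h1]; rfl
  have h3 : k + 1 - start = (k - start) + 1 := by omega
  rw [h3, List.take_add_one, h2]; rfl

-- the loop invariant: A's tmp is the CR/LF-filter of the slice from B's start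
lemma pv_loop_eq (l : List Char) : ∀ (cs : List Char) (k start : Nat)
    (stack : Int) (jl : List (List Char)),
    start ≤ k → cs.drop k = l →
    (l.foldl pvAStep
        (stack, jl, ((cs.drop start).take (k - start)).filter pvNotNl)).2.1
      = ((PySem.List.enumerate l (k : Int)).foldl (pvBStep cs)
          (stack, (start : Int), jl)).2.2 := by
  induction l with
  | nil => intro cs k start stack jl _ _; simp [PySem.List.enumerate]
  | cons ch rest ih =>
    intro cs k start stack jl hsk hd
    rw [PySem.List.enumerate_cons, List.foldl_cons, List.foldl_cons]
    have hseg : ((cs.drop start).take (k + 1 - start)).filter pvNotNl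
        = (if pvNotNl ch then
            ((cs.drop start).take (k - start)).filter pvNotNl ++ [ch]
          else ((cs.drop start).take (k - start)).filter pvNotNl) := by
      rw [pv_take_succ_of_drop hsk hd, List.filter_append]
      by_cases h : pvNotNl ch <;> simp [h]
    have hdrop : cs.drop (k + 1) = rest := by
      rw [← List.tail_drop, hd]; rfl
    set stack' := if ch == '{' then stack + 1 else if ch == '}' then stack - 1 else stack with hst
    by_cases h0 : stack' = 0
    · -- flush branch in both ports
      have hb0 : (stack' == 0) = true := by simp [h0]
      have hA : pvAStep (stack, jl, ((cs.drop start).take (k - start)).filter pvNotNl) ch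
          = (stack',
             (if (((cs.drop start).take (k + 1 - start)).filter pvNotNl).length != 0
              then jl ++ [((cs.drop start).take (k + 1 - start)).filter pvNotNl] else jl),
             ([] : List Char)) := by
        simp only [pvAStep, ← hst, hb0, if_true]
        rw [hseg]; simp [pvNotNl]
      have hB : pvBStep cs (stack, (start : Int), jl) ((k : Int), ch)
          = (stack', ((k : Int) + 1),
             (if (((cs.drop start).take (k + 1 - start)).filter pvNotNl).length != 0
              then jl ++ [((cs.drop start).take (k + 1 - start)).filter pvNotNl] else jl)) := by
        simp only [pvBStep, ← hst, hb0, if_true]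
        have : PySem.List.slice cs (some (start : Int)) (some ((k : Int) + 1))
            = (cs.drop start).take (k + 1 - start) := by
          have := PySem.List.slice_natCast (xs := cs) (a := start) (b := k + 1)
          push_cast at this
          exact this
        rw [this]
      rw [hA, hB]
      have hk1 : ((k : Int) + 1) = (((k + 1 : Nat)) : Int) := by push_cast; ring
      rw [hk1]
      have := ih cs (k + 1) (k + 1)
        stack'
        (if (((cs.drop start).take (k + 1 - start)).filter pvNotNl).length != 0
         then jl ++ [((cs.drop start).take (k + 1 - start)).filter pvNotNl] else jl)
        (le_refl _) hdrop
      simpa using this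
    · -- accumulate branch in both ports
      have hb0 : (stack' == 0) = false := by simp [h0]
      have hA : pvAStep (stack, jl, ((cs.drop start).take (k - start)).filter pvNotNl) ch
          = (stack', jl, ((cs.drop start).take (k + 1 - start)).filter pvNotNl) := by
        simp only [pvAStep, ← hst, hb0, Bool.false_eq_true, if_false]
        rw [hseg]; simp [pvNotNl]
      have hB : pvBStep cs (stack, (start : Int), jl) ((k : Int), ch)
          = (stack', (start : Int), jl) := by
        simp only [pvBStep, ← hst, hb0, Bool.false_eq_true, if_false]
      rw [hA, hB]
      have hk1 : ((k : Int) + 1) = (((k + 1 : Nat)) : Int) := by push_cast; ring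
      rw [hk1]
      exact ih cs (k + 1) start stack' jl (by omega) hdrop

-- ===== VERDICT (by name: the statement is the Claim_ definition above) =====
theorem parse_dumb_push_output_py_spec : Claim_equal_parse_dumb_push_output_py := by
  intro s _
  unfold Spec_parse_dumb_push_output_py parse_dumb_push_output_py parse_dumb_push_output_py_alt
  have h := pv_loop_eq s.toList s.toList 0 0 0 [] (le_refl 0) rfl
  simp only [Nat.sub_zero, List.take_zero, List.filter_nil, Nat.cast_zero] at h
  rw [h]
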